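-- pv_equiv track=rewrite | github.com/chineseocr/table-detect | table_build.py | table_line_cor
-- ===== SOURCE A (Python) =====
-- def table_line_cor(lines, axis='col', interval=10):
--
--     if axis == 'col':
--         edges = [[line[1], line[3]] for line in lines]
--     else:
--         edges = [[line[0], line[2]] for line in lines]
--
--     edges = sum(edges, [])
--     edges = sorted(edges)
--
--     nedges = len(edges)
--     edgesMap = {}
--     for i in range(nedges):
--         if i == 0:
--             edgesMap[edges[i]] = edges[i]
--             continue
--         else:
--             if edges[i] - edgesMap[edges[i - 1]] < interval:
--                 edgesMap[edges[i]] = edgesMap[edges[i - 1]]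
--             else:
--                 edgesMap[edges[i]] = edges[i]
--
--     edgesMapList = [[key, edgesMap[key]] for key in edgesMap]
--     edgesMapIndex = [line[1] for line in edgesMapList]
--     edgesMapIndex = list(set(edgesMapIndex))
--     edgesMapIndex = {x: ind for ind, x in enumerate(sorted(edgesMapIndex))}
--
--     if axis == 'col':
--         cor = [[edgesMapIndex[edgesMap[line[1]]], edgesMapIndex[edgesMap[line[3]]]] for line in lines]
--     else:
--         cor = [[edgesMapIndex[edgesMap[line[0]]], edgesMapIndex[edgesMap[line[2]]]] for line in lines]
--     return cor
-- ===== SOURCE B (Python) =====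
-- def table_line_cor(lines, axis='col', interval=10):
--     i, j = (1, 3) if axis == 'col' else (0, 2)
--     vals = sorted(set(x for line in lines for x in (line[i], line[j])))
--     idx = {}
--     for n, v in enumerate(vals):
--         if n == 0:
--             k, start = 0, v
--         elif v - start >= interval:
--             k, start = k + 1, v
--         idx[v] = k
--     return [[idx[line[i]], idx[line[j]]] for line in lines]
-- ===== Notes on version B (the rewrite author's own statement) =====
-- stated objective: simpler
-- what changed: A builds a chained representative dict over the sorted edge list (with duplicates), then re-derives cluster indices via a second set/sort/enumerate pass and two dict lookups per edge; B sorts the distinct edge values once and assigns cluster indices in a single running pass (increment when the value is >= interval past the current cluster start), then maps each line directly through that one index dict.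
import Mathlib
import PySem

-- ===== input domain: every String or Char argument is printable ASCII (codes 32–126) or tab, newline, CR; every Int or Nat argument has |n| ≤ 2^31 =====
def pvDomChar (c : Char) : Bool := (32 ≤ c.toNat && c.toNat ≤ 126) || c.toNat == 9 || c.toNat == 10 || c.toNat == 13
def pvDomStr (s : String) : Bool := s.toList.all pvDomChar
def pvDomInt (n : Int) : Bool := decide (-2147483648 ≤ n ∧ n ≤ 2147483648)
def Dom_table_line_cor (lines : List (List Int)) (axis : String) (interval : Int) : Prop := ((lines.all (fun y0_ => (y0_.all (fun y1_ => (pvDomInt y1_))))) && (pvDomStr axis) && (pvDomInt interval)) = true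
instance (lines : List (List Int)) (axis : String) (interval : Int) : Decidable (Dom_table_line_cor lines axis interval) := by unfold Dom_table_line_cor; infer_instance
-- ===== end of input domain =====

-- B fuses A's chain-clustering dict, its set/sort reindexing and the final lookup into one
-- sorted-distinct-values pass (objective: simpler); the proved equivalence is about return values.

-- ===== PORT A =====
def table_line_cor (lines : List (List Int)) (axis : String) (interval : Int) : List (List Int) :=
  let edges0 : List (List Int) :=
    if axis == "col" then
      lines.map (fun line => [PySem.List.pyGetD line 1 0, PySem.List.pyGetD line 3 0])
    else
      lines.map (fun line => [PySem.List.pyGetD line 0 0, PySem.List.pyGetD line 2 0])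
  let edges1 : List Int := edges0.flatten          -- sum(edges, [])
  let edges : List Int := PySem.List.sorted edges1 (fun x => x)
  let nedges : Int := (edges.length : Int)
  let edgesMap : PySem.Dict Int Int :=
    (PySem.List.pyRange 0 nedges).foldl (fun m i =>
      if i = 0 then
        m.insert (PySem.List.pyGetD edges i 0) (PySem.List.pyGetD edges i 0)
      else if PySem.List.pyGetD edges i 0 - m.getD (PySem.List.pyGetD edges (i - 1) 0) 0 < interval then
        m.insert (PySem.List.pyGetD edges i 0) (m.getD (PySem.List.pyGetD edges (i - 1) 0) 0)
      else
        m.insert (PySem.List.pyGetD edges i 0) (PySem.List.pyGetD edges i 0)) PySem.Dict.empty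
  let edgesMapList : List (List Int) := edgesMap.keys.map (fun key => [key, edgesMap.getD key 0])
  let edgesMapIndex0 : List Int := edgesMapList.map (fun line => PySem.List.pyGetD line 1 0)
  let edgesMapIndex1 : List Int := PySem.Set.ofList edgesMapIndex0      -- list(set(...))
  let edgesMapIndex : PySem.Dict Int Int :=
    (PySem.List.enumerate (PySem.List.sorted edgesMapIndex1 (fun x => x))).foldl
      (fun m p => m.insert p.2 p.1) PySem.Dict.empty
  if axis == "col" then
    lines.map (fun line =>
      [edgesMapIndex.getD (edgesMap.getD (PySem.List.pyGetD line 1 0) 0) 0,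
       edgesMapIndex.getD (edgesMap.getD (PySem.List.pyGetD line 3 0) 0) 0])
  else
    lines.map (fun line =>
      [edgesMapIndex.getD (edgesMap.getD (PySem.List.pyGetD line 0 0) 0) 0,
       edgesMapIndex.getD (edgesMap.getD (PySem.List.pyGetD line 2 0) 0) 0])

-- ===== PORT B =====
def table_line_cor_alt (lines : List (List Int)) (axis : String) (interval : Int) : List (List Int) :=
  let ij : Int × Int := if axis == "col" then (1, 3) else (0, 2)
  let vals : List Int :=
    PySem.List.sorted (PySem.Set.ofList (lines.flatMap (fun line =>
      [PySem.List.pyGetD line ij.1 0, PySem.List.pyGetD line ij.2 0]))) (fun x => x)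
  let st : PySem.Dict Int Int × Int × Int :=
    (PySem.List.enumerate vals).foldl
      (fun (s : PySem.Dict Int Int × Int × Int) p =>
        let ks : Int × Int :=
          if p.1 = 0 then (0, p.2)
          else if p.2 - s.2.2 ≥ interval then (s.2.1 + 1, p.2)
          else s.2
        (s.1.insert p.2 ks.1, ks))
      (PySem.Dict.empty, 0, 0)
  lines.map (fun line =>
    [st.1.getD (PySem.List.pyGetD line ij.1 0) 0,
     st.1.getD (PySem.List.pyGetD line ij.2 0) 0])

-- ===== PRECONDITION & SPEC =====
-- Pre_ excludes exactly the inputs on which Python A raises IndexError: a line shorter than 4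
-- (axis 'col', indices 1 and 3) resp. shorter than 3 (other axes, indices 0 and 2).
def Pre_table_line_cor (lines : List (List Int)) (axis : String) (interval : Int) : Prop :=
  ∀ line ∈ lines, (if axis = "col" then 4 else 3) ≤ line.length
instance (lines : List (List Int)) (axis : String) (interval : Int) : Decidable (Pre_table_line_cor lines axis interval) := by unfold Pre_table_line_cor; infer_instance
def pvWitness_table_line_cor : List (List Int) × String × Int := ([[1, 2, 3, 40], [5, 6, 7, 8]], "col", 10)

def Spec_table_line_cor (lines : List (List Int)) (axis : String) (interval : Int) (out : List (List Int)) : Prop := out = table_line_cor_alt lines axis interval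
instance (lines : List (List Int)) (axis : String) (interval : Int) (out : List (List Int)) : Decidable (Spec_table_line_cor lines axis interval out) := by unfold Spec_table_line_cor; infer_instance

-- ===== CLAIM (what is proved, stated in full; the proofs are below) =====
def Claim_equal_table_line_cor : Prop := ∀ (lines : List (List Int)) (axis : String) (interval : Int), Dom_table_line_cor lines axis interval → Pre_table_line_cor lines axis interval → Spec_table_line_cor lines axis interval (table_line_cor lines axis interval)

-- ===== LEMMAS AND PROOFS =====

def repAux (itv : Int) : Int → List Int → List (Int × Int)
  | _, [] => []
  | r, v :: vs =>
    let r' := if v - r < itv then r else v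
    (v, r') :: repAux itv r' vs
def repPairs (itv : Int) : List Int → List (Int × Int)
  | [] => []
  | v :: vs => (v, v) :: repAux itv v vs
def lastRep (itv : Int) : Int → List Int → Int
  | r, [] => r
  | r, v :: vs => lastRep itv (if v - r < itv then r else v) vs
def startsAux (itv : Int) : Int → List Int → List Int
  | _, [] => []
  | r, v :: vs => if v - r < itv then startsAux itv r vs else v :: startsAux itv v vs
def bIdx (itv : Int) : Int → Int → List Int → List (Int × Int)
  | _, _, [] => []
  | k, r, v :: vs =>
    if v - r ≥ itv then (v, k + 1) :: bIdx itv (k + 1) v vs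
    else (v, k) :: bIdx itv k r vs

theorem repAux_fst (itv r : Int) (vs : List Int) : (repAux itv r vs).map Prod.fst = vs := by
  induction vs generalizing r with
  | nil => simp [repAux]
  | cons v vs ih => simp [repAux, ih]

theorem repPairs_fst (itv : Int) (vs : List Int) : (repPairs itv vs).map Prod.fst = vs := by
  cases vs <;> simp [repPairs, repAux_fst]

theorem repAux_append (itv r : Int) (xs ys : List Int) :
    repAux itv r (xs ++ ys) = repAux itv r xs ++ repAux itv (lastRep itv r xs) ys := by
  induction xs generalizing r with
  | nil => simp [repAux, lastRep]
  | cons x xs ih => simp [repAux, lastRep, ih]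

theorem repAux_getLast? (itv r : Int) (vs : List Int) (hne : vs ≠ []) :
    ∃ x, vs.getLast? = some x ∧ (repAux itv r vs).getLast? = some (x, lastRep itv r vs) := by
  induction vs generalizing r with
  | nil => simp at hne
  | cons v vs ih =>
    cases vs with
    | nil => exact ⟨v, by simp [repAux, lastRep]⟩
    | cons w ws =>
      obtain ⟨x, hx1, hx2⟩ := ih (r := if v - r < itv then r else v) (by simp)
      refine ⟨x, ?_, ?_⟩
      · rw [List.getLast?_cons_cons]; exact hx1
      · simp only [repAux, lastRep]
        rw [List.getLast?_cons_cons]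
        · exact hx2

theorem repPairs_getLast? (itv : Int) (v : Int) (vs : List Int) :
    ∃ x, (v :: vs).getLast? = some x ∧
      (repPairs itv (v :: vs)).getLast? = some (x, lastRep itv v vs) := by
  cases vs with
  | nil => exact ⟨v, by simp [repPairs, repAux, lastRep]⟩
  | cons w ws =>
    obtain ⟨x, hx1, hx2⟩ := repAux_getLast? itv v (w :: ws) (by simp)
    refine ⟨x, ?_, ?_⟩
    · rw [List.getLast?_cons_cons]; exact hx1
    · have hne : repAux itv v (w :: ws) ≠ [] := by simp [repAux]
      simp only [repPairs]
      cases h : repAux itv v (w :: ws) with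
      | nil => exact absurd h hne
      | cons q qs => rw [List.getLast?_cons_cons]; rw [← h]; exact hx2

theorem repAux_mem_cases (itv r : Int) (vs : List Int) (x w : Int)
    (h : (x, w) ∈ repAux itv r vs) : w = x ∨ x - w < itv := by
  induction vs generalizing r with
  | nil => simp [repAux] at h
  | cons v vs ih =>
    simp only [repAux, List.mem_cons] at h
    rcases h with h | h
    · rcases Prod.mk.injEq .. ▸ h with ⟨h1, h2⟩
      by_cases hc : v - r < itv
      · right; simp [hc] at h2; omega
      · left; simp [hc] at h2; omega
    · exact ih _ h

theorem repAux_snd_bounds (itv r : Int) (vs : List Int) (x w : Int)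
    (hvs : vs.Pairwise (· < ·)) (hr : ∀ v ∈ vs, r < v)
    (h : (x, w) ∈ repAux itv r vs) : r ≤ w ∧ w ≤ x := by
  induction vs generalizing r with
  | nil => simp [repAux] at h
  | cons v vs ih =>
    simp only [repAux, List.mem_cons] at h
    have hrv : r < v := hr v (by simp)
    rcases h with h | h
    · obtain ⟨h1, h2⟩ := Prod.mk.injEq .. ▸ h
      subst h1
      by_cases hc : x - r < itv <;> simp [hc] at h2 <;> omega
    · by_cases hc : v - r < itv
      · simp only [if_pos hc] at h
        have := ih r (List.Pairwise.sublist (by simp) hvs) (fun u hu => hr u (by simp [hu])) h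
        omega
      · simp only [if_neg hc] at h
        have := ih v (List.Pairwise.sublist (by simp) hvs) (fun u hu => (List.pairwise_cons.mp hvs).1 u hu) h
        omega

theorem repAux_snd_mem (itv r : Int) (vs : List Int) (y : Int)
    (h : y ∈ (repAux itv r vs).map Prod.snd) : y = r ∨ y ∈ startsAux itv r vs := by
  induction vs generalizing r with
  | nil => simp [repAux] at h
  | cons v vs ih =>
    simp only [repAux, List.map_cons, List.mem_cons] at h
    by_cases hc : v - r < itv
    · simp only [startsAux, if_pos hc]
      simp only [if_pos hc] at h
      rcases h with h | h
      · left; exact h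
      · exact ih r h
    · simp only [startsAux, if_neg hc]
      simp only [if_neg hc] at h
      rcases h with h | h
      · right; simp [h]
      · rcases ih v h with h' | h'
        · right; simp [h']
        · right; simp [h']

theorem startsAux_subset_snd (itv r : Int) (vs : List Int) (y : Int)
    (h : y ∈ startsAux itv r vs) : y ∈ (repAux itv r vs).map Prod.snd := by
  induction vs generalizing r with
  | nil => simp [startsAux] at h
  | cons v vs ih =>
    by_cases hc : v - r < itv
    · simp only [startsAux, if_pos hc] at h
      simp only [repAux, List.map_cons, if_pos hc, List.mem_cons]
      right; exact ih r h
    · simp only [startsAux, if_neg hc, List.mem_cons] at h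
      simp only [repAux, List.map_cons, if_neg hc, List.mem_cons]
      rcases h with h | h
      · left; exact h
      · right; exact ih v h

theorem startsAux_pairwise (itv r : Int) (vs : List Int)
    (hvs : vs.Pairwise (· < ·)) (hr : ∀ v ∈ vs, r < v) :
    (r :: startsAux itv r vs).Pairwise (· < ·) := by
  induction vs generalizing r with
  | nil => simp [startsAux]
  | cons v vs ih =>
    have htail : vs.Pairwise (· < ·) := (List.pairwise_cons.mp hvs).2
    by_cases hc : v - r < itv
    · simp only [startsAux, if_pos hc]
      exact ih r htail (fun u hu => hr u (by simp [hu]))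
    · simp only [startsAux, if_neg hc]
      have hv := ih v htail (fun u hu => (List.pairwise_cons.mp hvs).1 u hu)
      refine List.pairwise_cons.mpr ⟨?_, hv⟩
      intro u hu
      rcases hu with _ | hu
      · exact hr v (by simp)
      · have := List.pairwise_cons.mp hv
        have hvu : v < u := this.1 u (by assumption)
        have : r < v := hr v (by simp)
        omega


theorem key_corr (itv : Int) (vs : List Int) (r k x : Int)
    (hvs : vs.Pairwise (· < ·)) (hr : ∀ v ∈ vs, r < v) (hx : x ∈ vs) :
    ∃ w, (x, w) ∈ repAux itv r vs ∧
      (x, if w = r then k else k + 1 + (List.idxOf w (startsAux itv r vs) : Int)) ∈ bIdx itv k r vs := by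
  induction vs generalizing r k with
  | nil => simp at hx
  | cons v vs ih =>
    have htail : vs.Pairwise (· < ·) := (List.pairwise_cons.mp hvs).2
    have hhead : ∀ u ∈ vs, v < u := (List.pairwise_cons.mp hvs).1
    have hrv : r < v := hr v (by simp)
    by_cases hc : v - r < itv
    · have hcb : ¬ (v - r ≥ itv) := by omega
      rcases List.mem_cons.mp hx with hxv | hxtail
      · subst hxv
        refine ⟨r, ?_, ?_⟩
        · simp [repAux, if_pos hc]
        · simp [bIdx, if_neg hcb]
      · obtain ⟨w, hw1, hw2⟩ := ih r k htail (fun u hu => lt_trans hrv (hhead u hu)) hxtail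
        refine ⟨w, ?_, ?_⟩
        · simp only [repAux, if_pos hc, List.mem_cons]; right; exact hw1
        · simp only [bIdx, if_neg hcb, List.mem_cons]
          right
          simpa only [startsAux, if_pos hc] using hw2
    · have hcb : v - r ≥ itv := by omega
      rcases List.mem_cons.mp hx with hxv | hxtail
      · subst hxv
        refine ⟨x, ?_, ?_⟩
        · simp [repAux, if_neg hc]
        · have hxr : x ≠ r := by omega
          simp only [startsAux, if_neg hc, bIdx, if_pos hcb, List.mem_cons]
          left
          simp [hxr, List.idxOf_cons_self]
      · obtain ⟨w, hw1, hw2⟩ := ih v (k + 1) htail hhead hxtail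
        have hwv : v ≤ w := (repAux_snd_bounds itv v vs x w htail hhead hw1).1
        have hwr : w ≠ r := by omega
        refine ⟨w, ?_, ?_⟩
        · simp only [repAux, if_neg hc, List.mem_cons]; right; exact hw1
        · simp only [bIdx, if_pos hcb, List.mem_cons]
          right
          simp only [startsAux, if_neg hc]
          by_cases hwv2 : w = v
          · subst hwv2
            rw [if_neg hwr]
            simpa [List.idxOf_cons_self] using hw2
          · have hidx : List.idxOf w (v :: startsAux itv v vs) = List.idxOf w (startsAux itv v vs) + 1 := by
              rw [List.idxOf_cons_ne _ (by exact fun h => hwv2 h.symm)]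
            rw [hidx]
            push_cast
            have heq : k + 1 + ((List.idxOf w (startsAux itv v vs) : Int) + 1) = k + 1 + 1 + (List.idxOf w (startsAux itv v vs) : Int) := by ring
            rw [heq, if_neg hwr]
            simpa [hwv2] using hw2

theorem bIdx_fst (itv k r : Int) (vs : List Int) : (bIdx itv k r vs).map Prod.fst = vs := by
  induction vs generalizing k r with
  | nil => simp [bIdx]
  | cons v vs ih =>
    by_cases hc : v - r ≥ itv <;> simp [bIdx, hc, ih]

theorem insert_mem_self {κ ν : Type} [BEq κ] [LawfulBEq κ] (d : PySem.Dict κ ν) (k : κ) (w : ν)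
    (hnd : d.keys.Nodup) (hmem : (k, w) ∈ d.items) : d.insert k w = d := by
  apply PySem.Dict.ext
  have hc : d.contains k = true := by
    rw [PySem.Dict.contains_iff_mem_keys]
    have : k ∈ d.items.map Prod.fst := List.mem_map.mpr ⟨(k, w), hmem, rfl⟩
    simpa [PySem.Dict.keys] using this
  rw [PySem.Dict.items_insert_of_contains d w hc]
  have hinj : ∀ x ∈ d.items, ∀ y ∈ d.items, x.1 = y.1 → x = y := by
    apply List.inj_on_of_nodup_map
    simpa [PySem.Dict.keys] using hnd
  have hcong : ∀ p ∈ d.items, (if (p.1 == k) = true then (k, w) else p) = p := by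
    intro p hp
    by_cases hpk : p.1 = k
    · have : p = (k, w) := hinj p hp (k, w) hmem (by simp [hpk])
      simp [this]
    · simp [hpk]
  rw [List.map_congr_left hcong]; simp

theorem mem_enumerate_idx {α : Type} (S : List α) (off : Int) (j : Nat) (h : j < S.length) :
    (off + (j : Int), S[j]) ∈ PySem.List.enumerate S off := by
  induction S generalizing off j with
  | nil => simp at h
  | cons a S ih =>
    cases j with
    | zero => simp [PySem.List.enumerate]
    | succ j =>
      simp only [PySem.List.enumerate, List.mem_cons]
      right
      have := ih (off + 1) j (by simpa using h)
      simpa [add_comm, add_left_comm, add_assoc] using this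

theorem enumerate_snd_map {α : Type} (S : List α) (off : Int) :
    (PySem.List.enumerate S off).map Prod.snd = S := by
  induction S generalizing off with
  | nil => simp [PySem.List.enumerate]
  | cons a S ih => simp [PySem.List.enumerate, ih]

theorem rank_getD (S : List Int) (hnd : S.Nodup) (x : Int) (hx : x ∈ S) :
    ((PySem.List.enumerate S).foldl (fun (m : PySem.Dict Int Int) p => m.insert p.2 p.1)
      PySem.Dict.empty).getD x 0 = (List.idxOf x S : Int) := by
  have hsnd : (PySem.List.enumerate S 0).map Prod.snd = S := enumerate_snd_map S 0
  have hitems := PySem.Dict.items_foldl_insert_fresh (PySem.List.enumerate S 0)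
      Prod.snd Prod.fst (PySem.Dict.empty)
      (fun a _ => PySem.Dict.contains_empty _)
      (by rw [hsnd]; exact hnd)
  have hj : S.idxOf x < S.length := List.idxOf_lt_length_of_mem hx
  have hmemE : ((0 : Int) + (S.idxOf x : Int), S[S.idxOf x]) ∈ PySem.List.enumerate S 0 :=
    mem_enumerate_idx S 0 (S.idxOf x) hj
  rw [List.getElem_idxOf] at hmemE
  apply PySem.Dict.getD_of_mem_items
  · rw [hitems]
    refine List.mem_append.mpr (Or.inr ?_)
    exact List.mem_map.mpr ⟨((0 : Int) + (S.idxOf x : Int), x), hmemE, by simp⟩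
  · exact PySem.Dict.nodup_keys_foldl_insert_key _ _ _ _ PySem.Dict.nodup_keys_empty

theorem b_fold_items (itv : Int) (vs : List Int) (off : Int) (hoff : 1 ≤ off)
    (d : PySem.Dict Int Int) (k r : Int)
    (hfresh : ∀ v ∈ vs, d.contains v = false) (hnd : vs.Nodup) :
    ((PySem.List.enumerate vs off).foldl
      (fun (s : PySem.Dict Int Int × Int × Int) p =>
        let ks : Int × Int :=
          if p.1 = 0 then (0, p.2)
          else if p.2 - s.2.2 ≥ itv then (s.2.1 + 1, p.2)
          else s.2
        (s.1.insert p.2 ks.1, ks)) (d, k, r)).1.items = d.items ++ bIdx itv k r vs := by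
  induction vs generalizing off d k r with
  | nil => simp [PySem.List.enumerate, bIdx]
  | cons v vs ih =>
    have hvne : (off : Int) ≠ 0 := by omega
    have hfv : d.contains v = false := hfresh v (by simp)
    have hfresh' : ∀ w : Int, ∀ u ∈ vs, (d.insert v w).contains u = false := by
      intro w u hu
      rw [PySem.Dict.contains_insert]
      have huv : u ≠ v := by
        intro h; subst h; exact (List.nodup_cons.mp hnd).1 hu
      simp [huv, hfresh u (List.mem_cons_of_mem _ hu)]
    have hnd' : vs.Nodup := (List.nodup_cons.mp hnd).2
    simp only [PySem.List.enumerate, List.foldl_cons]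
    by_cases hc : v - r ≥ itv
    · simp only [if_neg hvne, if_pos hc]
      rw [ih (off + 1) (by omega) _ _ _ (hfresh' _) hnd']
      rw [PySem.Dict.items_insert_of_not_contains d _ hfv]
      simp [bIdx, if_pos hc]
    · simp only [if_neg hvne, if_neg hc]
      rw [ih (off + 1) (by omega) _ _ _ (hfresh' _) hnd']
      rw [PySem.Dict.items_insert_of_not_contains d _ hfv]
      simp [bIdx, if_neg hc]

theorem repPairs_mem_cases (itv : Int) (vs : List Int) (x w : Int)
    (h : (x, w) ∈ repPairs itv vs) : w = x ∨ x - w < itv := by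
  cases vs with
  | nil => simp [repPairs] at h
  | cons v t =>
    simp only [repPairs, List.mem_cons] at h
    rcases h with h | h
    · left; exact (Prod.mk.injEq .. ▸ h).2.symm ▸ (Prod.mk.injEq .. ▸ h).1.symm ▸ rfl
    · exact repAux_mem_cases itv v t x w h

theorem a_fold_aux (itv : Int) (es : List Int) (hsorted : es.Pairwise (· ≤ ·))
    (n : Nat) (hn : n ≤ es.length) :
    ∃ W, W = PySem.Set.ofList (es.take n) ∧ W.Pairwise (· < ·) ∧
      (0 < n → ∃ h : n - 1 < es.length, W.getLast? = some es[n - 1]) ∧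
      ((PySem.List.pyRange 0 (n : Int)).foldl (fun m i =>
        if i = 0 then
          m.insert (PySem.List.pyGetD es i 0) (PySem.List.pyGetD es i 0)
        else if PySem.List.pyGetD es i 0 - m.getD (PySem.List.pyGetD es (i - 1) 0) 0 < itv then
          m.insert (PySem.List.pyGetD es i 0) (m.getD (PySem.List.pyGetD es (i - 1) 0) 0)
        else
          m.insert (PySem.List.pyGetD es i 0) (PySem.List.pyGetD es i 0)) PySem.Dict.empty).items
        = repPairs itv W := by
  have hpw := List.pairwise_iff_getElem.mp hsorted
  induction n with
  | zero =>
    refine ⟨[], by simp, by simp, by simp, ?_⟩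
    have h0 : PySem.List.pyRange 0 ((0 : Nat) : Int) = [] := rfl
    rw [h0, List.foldl_nil]
    rfl
  | succ n ih =>
    obtain ⟨W, hWdef, hWlt, hWlast, hWitems⟩ := ih (by omega)
    have hnlt : n < es.length := by omega
    set v := es[n] with hv
    have htake : es.take (n + 1) = es.take n ++ [v] := by
      rw [List.take_add_one, List.getElem?_eq_getElem hnlt]; rfl
    have hrange : PySem.List.pyRange 0 ((n + 1 : Nat) : Int)
        = PySem.List.pyRange 0 (n : Int) ++ [(n : Int)] := by
      have := PySem.List.pyRange_one_succ_right (a := 0) (b := (n : Int)) (by positivity)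
      push_cast
      rw [← this]
    have hget_n : PySem.List.pyGetD es ((n : Int)) 0 = v := by
      rw [PySem.List.pyGetD_natCast, List.getD_eq_getElem?_getD, List.getElem?_eq_getElem hnlt]
      rfl
    have hWnodup : W.Nodup := hWlt.imp (fun h => ne_of_lt h)
    have hkeys : (PySem.Dict.mk (repPairs itv W) : PySem.Dict Int Int).keys = W := by
      simpa [PySem.Dict.keys] using repPairs_fst itv W
    rw [hrange, List.foldl_append]
    by_cases hn0 : n = 0
    · subst hn0
      refine ⟨[v], ?_, by simp, ?_, ?_⟩
      · rw [htake]
        rfl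
      · exact fun _ => ⟨by omega, rfl⟩
      · have h0 : PySem.List.pyRange 0 ((0 : Nat) : Int) = [] := rfl
        rw [h0, List.foldl_nil, List.foldl_cons, List.foldl_nil]
        simp only [Nat.cast_zero] at hget_n ⊢
        rw [if_true, hget_n]
        have hce : (PySem.Dict.empty : PySem.Dict Int Int).contains v = false := PySem.Dict.contains_empty v
        rw [PySem.Dict.items_insert_of_not_contains _ _ hce]
        rfl
    · -- n ≥ 1
      have hn1 : 0 < n := Nat.pos_of_ne_zero hn0
      obtain ⟨hn1lt, hlast⟩ := hWlast hn1
      have hWne : W ≠ [] := by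
        intro h; rw [h] at hlast; simp at hlast
      have hprev : es[n - 1] ≤ v := by
        have h : n - 1 < n := by omega
        exact hpw (n - 1) n hn1lt hnlt h
      -- the single new step of the fold
      have hine : (n : Int) ≠ 0 := by exact_mod_cast hn0
      have hget_prev : PySem.List.pyGetD es ((n : Int) - 1) 0 = es[n - 1] := by
        have hcast : (n : Int) - 1 = ((n - 1 : Nat) : Int) := by omega
        rw [hcast, PySem.List.pyGetD_natCast, List.getD_eq_getElem?_getD,
          List.getElem?_eq_getElem hn1lt]
        rfl
      obtain ⟨v0, t, rfl⟩ : ∃ v0 t, W = v0 :: t := by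
        cases W with
        | nil => exact absurd rfl hWne
        | cons a b => exact ⟨a, b, rfl⟩
      obtain ⟨x, hx1, hx2⟩ := repPairs_getLast? itv v0 t
      rw [hlast] at hx1
      obtain rfl : x = es[n - 1] := by injection hx1 with h; exact h.symm
      set w := lastRep itv v0 t with hw
      have hpair : (es[n - 1], w) ∈ repPairs itv (v0 :: t) := List.mem_of_getLast? hx2
      set F := fun (m : PySem.Dict Int Int) (i : Int) =>
        if i = 0 then
          m.insert (PySem.List.pyGetD es i 0) (PySem.List.pyGetD es i 0)
        else if PySem.List.pyGetD es i 0 - m.getD (PySem.List.pyGetD es (i - 1) 0) 0 < itv then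
          m.insert (PySem.List.pyGetD es i 0) (m.getD (PySem.List.pyGetD es (i - 1) 0) 0)
        else
          m.insert (PySem.List.pyGetD es i 0) (PySem.List.pyGetD es i 0) with hF
      set dn := List.foldl F PySem.Dict.empty (PySem.List.pyRange 0 (n : Int)) with hdn
      have hdnkeys : dn.keys.Nodup := by
        have : dn.keys = (v0 :: t) := by
          show dn.items.map Prod.fst = _
          rw [hWitems, repPairs_fst]
        rw [this]; exact hWnodup
      have hdnkeys_eq : dn.keys = (v0 :: t) := by
        show dn.items.map Prod.fst = _
        rw [hWitems, repPairs_fst]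
      have hgetd : dn.getD es[n - 1] 0 = w := by
        apply PySem.Dict.getD_of_mem_items
        · rw [hWitems]; exact hpair
        · exact hdnkeys
      have hstep : List.foldl F dn [(n : Int)] = F dn (n : Int) := by
        rw [List.foldl_cons, List.foldl_nil]
      have hFval : F dn (n : Int)
          = dn.insert v (if v - w < itv then w else v) := by
        rw [hF]
        simp only [if_neg hine, hget_n, hget_prev, hgetd]
        by_cases hc : v - w < itv
        · rw [if_pos hc, if_pos hc]
        · rw [if_neg hc, if_neg hc]
      by_cases hvW : v ∈ (v0 :: t)
      · -- duplicate value: dict unchanged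
        have hvle : v ≤ es[n - 1] := by
          have hvtake : v ∈ es.take n := by
            rw [hWdef] at hvW
            exact (PySem.Set.mem_ofList _ _).mp hvW
          obtain ⟨j, hj, hjv⟩ := List.getElem_of_mem hvtake
          have hjn : j < n := by simp at hj; omega
          rw [List.getElem_take] at hjv
          rcases Nat.lt_or_ge j (n - 1) with h | h
          · rw [← hjv]; exact hpw j (n - 1) (by omega) hn1lt h
          · have : j = n - 1 := by omega
            subst this; omega
        have hveq : v = es[n - 1] := le_antisymm hvle hprev
        have hwv : (if v - w < itv then w else v) = w := by
          rcases repPairs_mem_cases itv (v0 :: t) es[n - 1] w hpair with h | h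
          · rw [← hveq] at h
            by_cases hc : v - w < itv
            · rw [if_pos hc]
            · rw [if_neg hc]; exact h.symm
          · rw [← hveq] at h
            rw [if_pos h]
        refine ⟨v0 :: t, ?_, hWlt, ?_, ?_⟩
        · rw [htake, PySem.Set.ofList_append_singleton, ← hWdef,
            PySem.Set.add_of_mem hvW]
        · intro _
          refine ⟨by omega, ?_⟩
          simp only [Nat.add_sub_cancel]
          rw [hlast, ← hveq, hv]
        · rw [hstep, hFval, hwv, insert_mem_self dn v w hdnkeys ?_, hWitems]
          rw [hWitems, hveq]
          exact hpair
      · -- fresh value: appended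
        have hlt : ∀ y ∈ (v0 :: t), y < v := by
          intro y hy
          have hytake : y ∈ es.take n := by
            rw [hWdef] at hy
            exact (PySem.Set.mem_ofList _ _).mp hy
          obtain ⟨j, hj, hjv⟩ := List.getElem_of_mem hytake
          have hjn : j < n := by simp at hj; omega
          rw [List.getElem_take] at hjv
          have hyle : y ≤ v := by rw [← hjv]; exact hpw j n (by omega) hnlt hjn
          have hyne : y ≠ v := by
            intro h; subst h; exact hvW hy
          omega
        have hcont : dn.contains v = false := by
          by_contra h
          have : dn.contains v = true := by
            cases hcv : dn.contains v
            · exact absurd hcv h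
            · rfl
          rw [PySem.Dict.contains_iff_mem_keys, hdnkeys_eq] at this
          exact hvW this
        refine ⟨v0 :: t ++ [v], ?_, ?_, ?_, ?_⟩
        · rw [htake, PySem.Set.ofList_append_singleton, ← hWdef,
            PySem.Set.add_of_not_mem hvW]
        · rw [List.pairwise_append]
          exact ⟨hWlt, by simp, by simpa using hlt⟩
        · intro _
          refine ⟨by omega, ?_⟩
          simp only [Nat.add_sub_cancel]
          rw [show ((v0 :: t ++ [v]) : List Int) = (v0 :: t) ++ [v] by simp,
            List.getLast?_concat, hv]
        · rw [hstep, hFval,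
            PySem.Dict.items_insert_of_not_contains dn _ hcont, hWitems]
          have hrhs : repPairs itv (v0 :: t ++ [v])
              = repPairs itv (v0 :: t) ++ [(v, if v - w < itv then w else v)] := by
            show repPairs itv (v0 :: (t ++ [v])) = _
            simp only [repPairs, repAux_append, hw]
            rw [show repAux itv (lastRep itv v0 t) [v]
                = [(v, if v - lastRep itv v0 t < itv then lastRep itv v0 t else v)] from rfl]
            simp
          rw [hrhs]

theorem a_fold_items (itv : Int) (es : List Int) (hsorted : es.Pairwise (· ≤ ·)) :
    ∃ W, W = PySem.Set.ofList es ∧ W.Pairwise (· < ·) ∧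
      ((PySem.List.pyRange 0 (es.length : Int)).foldl (fun m i =>
        if i = 0 then
          m.insert (PySem.List.pyGetD es i 0) (PySem.List.pyGetD es i 0)
        else if PySem.List.pyGetD es i 0 - m.getD (PySem.List.pyGetD es (i - 1) 0) 0 < itv then
          m.insert (PySem.List.pyGetD es i 0) (m.getD (PySem.List.pyGetD es (i - 1) 0) 0)
        else
          m.insert (PySem.List.pyGetD es i 0) (PySem.List.pyGetD es i 0)) PySem.Dict.empty).items
        = repPairs itv W := by
  obtain ⟨W, h1, h2, _, h4⟩ := a_fold_aux itv es hsorted es.length (le_refl _)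
  exact ⟨W, by simpa using h1, h2, h4⟩

def aDict (itv : Int) (L : List Int) : PySem.Dict Int Int :=
  (PySem.List.pyRange 0 ((PySem.List.sorted L (fun x => x)).length : Int)).foldl (fun m i =>
    if i = 0 then
      m.insert (PySem.List.pyGetD (PySem.List.sorted L (fun x => x)) i 0)
        (PySem.List.pyGetD (PySem.List.sorted L (fun x => x)) i 0)
    else if PySem.List.pyGetD (PySem.List.sorted L (fun x => x)) i 0
        - m.getD (PySem.List.pyGetD (PySem.List.sorted L (fun x => x)) (i - 1) 0) 0 < itv then
      m.insert (PySem.List.pyGetD (PySem.List.sorted L (fun x => x)) i 0)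
        (m.getD (PySem.List.pyGetD (PySem.List.sorted L (fun x => x)) (i - 1) 0) 0)
    else
      m.insert (PySem.List.pyGetD (PySem.List.sorted L (fun x => x)) i 0)
        (PySem.List.pyGetD (PySem.List.sorted L (fun x => x)) i 0)) PySem.Dict.empty

def aRank (itv : Int) (L : List Int) : PySem.Dict Int Int :=
  (PySem.List.enumerate (PySem.List.sorted
    (PySem.Set.ofList (((aDict itv L).keys.map (fun key => [key, (aDict itv L).getD key 0])).map
      (fun line => PySem.List.pyGetD line 1 0))) (fun x => x))).foldl
    (fun m p => m.insert p.2 p.1) PySem.Dict.empty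

def bDict (itv : Int) (L : List Int) : PySem.Dict Int Int :=
  ((PySem.List.enumerate (PySem.List.sorted (PySem.Set.ofList L) (fun x => x))).foldl
    (fun (s : PySem.Dict Int Int × Int × Int) p =>
      let ks : Int × Int :=
        if p.1 = 0 then (0, p.2)
        else if p.2 - s.2.2 ≥ itv then (s.2.1 + 1, p.2)
        else s.2
      (s.1.insert p.2 ks.1, ks))
    (PySem.Dict.empty, 0, 0)).1

theorem per_value (itv : Int) (L : List Int) (y : Int) (hy : y ∈ L) :
    (aRank itv L).getD ((aDict itv L).getD y 0) 0 = (bDict itv L).getD y 0 := by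
  classical
  set es := PySem.List.sorted L (fun x => x) with hes
  have hsorted : es.Pairwise (· ≤ ·) := PySem.List.sorted_pairwise L (fun x => x)
  obtain ⟨W, hWdef, hWlt, hitems⟩ := a_fold_items itv es hsorted
  have hWnodup : W.Nodup := hWlt.imp (fun h => ne_of_lt h)
  have hDitems : (aDict itv L).items = repPairs itv W := hitems
  have hDkeys : (aDict itv L).keys = W := by
    show (aDict itv L).items.map Prod.fst = W
    rw [hDitems, repPairs_fst]
  have hDnodup : (aDict itv L).keys.Nodup := by rw [hDkeys]; exact hWnodup
  have hmemW : ∀ x : Int, x ∈ W ↔ x ∈ L := by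
    intro x
    rw [hWdef, PySem.Set.mem_ofList, hes, PySem.List.mem_sorted]
  have hyW : y ∈ W := (hmemW y).mpr hy
  -- B's sorted distinct values coincide with W
  have hvals : PySem.List.sorted (PySem.Set.ofList L) (fun x => x) = W := by
    apply PySem.List.sorted_eq_of_perm_of_pairwise_lt
    · rw [List.perm_ext_iff_of_nodup hWnodup (PySem.Set.nodup_ofList L)]
      intro x
      rw [hmemW, PySem.Set.mem_ofList]
    · exact hWlt
  obtain ⟨v0, t, rfl⟩ : ∃ v0 t, W = v0 :: t := by
    cases hW : W with
    | nil => rw [hW] at hyW; simp at hyW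
    | cons a b => exact ⟨a, b, rfl⟩
  have hhead : ∀ u ∈ t, v0 < u := (List.pairwise_cons.mp hWlt).1
  have htpw : t.Pairwise (· < ·) := (List.pairwise_cons.mp hWlt).2
  -- A's list of representatives
  have hreps : ((aDict itv L).keys.map (fun key => [key, (aDict itv L).getD key 0])).map
      (fun line => PySem.List.pyGetD line 1 0) = (repPairs itv (v0 :: t)).map Prod.snd := by
    rw [List.map_map]
    have hstep : ∀ k : Int, (fun line => PySem.List.pyGetD line 1 0)
        ([k, (aDict itv L).getD k 0]) = (aDict itv L).getD k 0 := fun _ => rfl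
    calc (aDict itv L).keys.map ((fun line => PySem.List.pyGetD line 1 0) ∘
          (fun key => [key, (aDict itv L).getD key 0]))
        = (aDict itv L).keys.map (fun k => (aDict itv L).getD k 0) := by
          apply List.map_congr_left; intro k _; rfl
      _ = (aDict itv L).values := (PySem.Dict.values_eq_map_keys _ hDnodup 0).symm
      _ = (repPairs itv (v0 :: t)).map Prod.snd := by
          show (aDict itv L).items.map Prod.snd = _
          rw [hDitems]
  -- the sorted set of representatives is the list of cluster starts
  have hS : PySem.List.sorted (PySem.Set.ofList ((repPairs itv (v0 :: t)).map Prod.snd))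
      (fun x => x) = v0 :: startsAux itv v0 t := by
    apply PySem.List.sorted_eq_of_perm_of_pairwise_lt
    · have hSnodup : (v0 :: startsAux itv v0 t).Nodup :=
        (startsAux_pairwise itv v0 t htpw hhead).imp (fun h => ne_of_lt h)
      rw [List.perm_ext_iff_of_nodup hSnodup (PySem.Set.nodup_ofList _)]
      intro x
      rw [PySem.Set.mem_ofList]
      constructor
      · intro hx
        rcases List.mem_cons.mp hx with hx | hx
        · show x ∈ (repPairs itv (v0 :: t)).map Prod.snd
          simp [repPairs, hx]
        · show x ∈ (repPairs itv (v0 :: t)).map Prod.snd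
          simp only [repPairs, List.map_cons, List.mem_cons]
          right
          exact startsAux_subset_snd itv v0 t x hx
      · intro hx
        simp only [repPairs, List.map_cons, List.mem_cons] at hx
        rcases hx with hx | hx
        · simp [hx]
        · rcases repAux_snd_mem itv v0 t x hx with h | h
          · simp [h]
          · simp [h]
    · exact startsAux_pairwise itv v0 t htpw hhead
  have hSnodup : (v0 :: startsAux itv v0 t).Nodup :=
    (startsAux_pairwise itv v0 t htpw hhead).imp (fun h => ne_of_lt h)
  -- B's dict
  have hBitems : (bDict itv L).items = (v0, 0) :: bIdx itv 0 v0 t := by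
    show ((PySem.List.enumerate (PySem.List.sorted (PySem.Set.ofList L) (fun x => x))).foldl
      _ (PySem.Dict.empty, 0, 0)).1.items = _
    rw [hvals]
    have henum : PySem.List.enumerate (v0 :: t) = (0, v0) :: PySem.List.enumerate t 1 := rfl
    rw [henum, List.foldl_cons]
    have hfirst : ((PySem.Dict.empty : PySem.Dict Int Int).insert v0 0).items = [(v0, 0)] := by
      rw [PySem.Dict.items_insert_of_not_contains _ _ (PySem.Dict.contains_empty v0)]
      rfl
    have hfresh : ∀ u ∈ t, ((PySem.Dict.empty : PySem.Dict Int Int).insert v0 0).contains u = false := by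
      intro u hu
      rw [PySem.Dict.contains_insert]
      have : u ≠ v0 := fun h => absurd (hhead u hu) (by rw [h]; omega)
      simp [this, PySem.Dict.contains_empty]
    have hndt : t.Nodup := htpw.imp (fun h => ne_of_lt h)
    have h2 := b_fold_items itv t 1 (by omega)
      ((PySem.Dict.empty : PySem.Dict Int Int).insert v0 0) 0 v0 hfresh hndt
    rw [hfirst] at h2
    exact h2
  have hBkeys : (bDict itv L).keys.Nodup := by
    have : (bDict itv L).keys = v0 :: t := by
      show (bDict itv L).items.map Prod.fst = _
      rw [hBitems]
      simp [bIdx_fst]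
    rw [this]; exact hWnodup
  -- rank lookups
  have hrank : ∀ s ∈ (v0 :: startsAux itv v0 t),
      (aRank itv L).getD s 0 = (List.idxOf s (v0 :: startsAux itv v0 t) : Int) := by
    intro s hs
    show ((PySem.List.enumerate _).foldl _ PySem.Dict.empty).getD s 0 = _
    rw [hreps, hS]
    exact rank_getD _ hSnodup s hs
  rcases List.mem_cons.mp hyW with hyv | hyt
  · -- y is the smallest distinct value
    subst hyv
    have hA : (aDict itv L).getD y 0 = y := by
      apply PySem.Dict.getD_of_mem_items _ _ hDnodup
      rw [hDitems]
      simp [repPairs]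
    have hB : (bDict itv L).getD y 0 = 0 := by
      apply PySem.Dict.getD_of_mem_items _ _ hBkeys
      rw [hBitems]
      simp
    rw [hA, hB, hrank y (by simp)]
    simp [List.idxOf_cons_self]
  · -- y is a later distinct value
    obtain ⟨w, hw1, hw2⟩ := key_corr itv t v0 0 y htpw hhead hyt
    have hA : (aDict itv L).getD y 0 = w := by
      apply PySem.Dict.getD_of_mem_items _ _ hDnodup
      rw [hDitems]
      simp only [repPairs, List.mem_cons]
      right; exact hw1
    have hB : (bDict itv L).getD y 0
        = (if w = v0 then 0 else 0 + 1 + (List.idxOf w (startsAux itv v0 t) : Int)) := by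
      apply PySem.Dict.getD_of_mem_items _ _ hBkeys
      rw [hBitems]
      exact List.mem_cons_of_mem _ hw2
    have hwmem : w ∈ (v0 :: startsAux itv v0 t) := by
      have : w ∈ (repAux itv v0 t).map Prod.snd := List.mem_map.mpr ⟨(y, w), hw1, rfl⟩
      rcases repAux_snd_mem itv v0 t w this with h | h
      · simp [h]
      · simp [h]
    rw [hA, hB, hrank w hwmem]
    by_cases hwv : w = v0
    · subst hwv
      simp [List.idxOf_cons_self]
    · rw [if_neg hwv, List.idxOf_cons_ne _ (fun h => hwv h.symm)]
      push_cast
      ring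

theorem main_eq (lines : List (List Int)) (axis : String) (interval : Int) :
    table_line_cor lines axis interval = table_line_cor_alt lines axis interval := by
  unfold table_line_cor table_line_cor_alt
  cases hax : (axis == "col") with
  | true =>
    simp only [if_true, List.flatMap_def]
    apply List.map_congr_left
    intro line hline
    have hm1 : PySem.List.pyGetD line 1 0
        ∈ (lines.map (fun l => [PySem.List.pyGetD l 1 0, PySem.List.pyGetD l 3 0])).flatten := by
      rw [List.mem_flatten]
      exact ⟨_, List.mem_map.mpr ⟨line, hline, rfl⟩, by simp⟩
    have hm3 : PySem.List.pyGetD line 3 0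
        ∈ (lines.map (fun l => [PySem.List.pyGetD l 1 0, PySem.List.pyGetD l 3 0])).flatten := by
      rw [List.mem_flatten]
      exact ⟨_, List.mem_map.mpr ⟨line, hline, rfl⟩, by simp⟩
    have h1 := per_value interval _ _ hm1
    have h3 := per_value interval _ _ hm3
    show [(aRank interval _).getD ((aDict interval _).getD (PySem.List.pyGetD line 1 0) 0) 0,
          (aRank interval _).getD ((aDict interval _).getD (PySem.List.pyGetD line 3 0) 0) 0]
        = [(bDict interval _).getD (PySem.List.pyGetD line 1 0) 0,
           (bDict interval _).getD (PySem.List.pyGetD line 3 0) 0]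
    rw [h1, h3]
  | false =>
    simp only [if_false, Bool.false_eq_true, List.flatMap_def]
    apply List.map_congr_left
    intro line hline
    have hm0 : PySem.List.pyGetD line 0 0
        ∈ (lines.map (fun l => [PySem.List.pyGetD l 0 0, PySem.List.pyGetD l 2 0])).flatten := by
      rw [List.mem_flatten]
      exact ⟨_, List.mem_map.mpr ⟨line, hline, rfl⟩, by simp⟩
    have hm2 : PySem.List.pyGetD line 2 0
        ∈ (lines.map (fun l => [PySem.List.pyGetD l 0 0, PySem.List.pyGetD l 2 0])).flatten := by
      rw [List.mem_flatten]
      exact ⟨_, List.mem_map.mpr ⟨line, hline, rfl⟩, by simp⟩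
    have h0 := per_value interval _ _ hm0
    have h2 := per_value interval _ _ hm2
    show [(aRank interval _).getD ((aDict interval _).getD (PySem.List.pyGetD line 0 0) 0) 0,
          (aRank interval _).getD ((aDict interval _).getD (PySem.List.pyGetD line 2 0) 0) 0]
        = [(bDict interval _).getD (PySem.List.pyGetD line 0 0) 0,
           (bDict interval _).getD (PySem.List.pyGetD line 2 0) 0]
    rw [h0, h2]

-- ===== VERDICT (by name: the statement is the Claim_ definition above) =====
theorem table_line_cor_spec : Claim_equal_table_line_cor := by
  intro lines axis interval _ _
  unfold Spec_table_line_cor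
  exact main_eq lines axis interval
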